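-- pv_equiv track=rewrite | github.com/moink/AoC2016 | day7/day7.py | split_brackets
-- ===== SOURCE A (Python) =====
-- def split_brackets(ip_address):
--     outside = ['']
--     inside = []
--     in_brackets = False
--     for pos, char in enumerate(ip_address):
--         if char == '[':
--             in_brackets = True
--             inside.append('')
--         elif char == ']':
--             in_brackets = False
--             outside.append('')
--         elif in_brackets:
--             inside[-1] = inside[-1] + char
--         else:
--             outside[-1] = outside[-1] + char
--     return inside, outside
-- ===== SOURCE B (Python) =====
-- def split_brackets(ip_address):
--     # Two independent extraction passes instead of a stateful per-char parser:
--     # each bracket segment is the run of non-bracket chars after its opening char.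
--     def runs_after(b, s):
--         out = []
--         i = s.find(b)
--         while i != -1:
--             j = i + 1
--             while j < len(s) and s[j] not in '[]':
--                 j += 1
--             out.append(s[i + 1:j])
--             i = s.find(b, j)
--         return out
--     k = 0
--     while k < len(ip_address) and ip_address[k] not in '[]':
--         k += 1
--     return runs_after('[', ip_address), [ip_address[:k]] + runs_after(']', ip_address)
-- ===== Notes on version B (the rewrite author's own statement) =====
-- stated objective: alternative
-- what changed: Replaces the single stateful char-by-char parser (in_brackets flag, rebuilding the last bucket by string concatenation per char) with two independent extraction passes that slice out whole runs: inside is the non-bracket run after each opening bracket, outside is the initial non-bracket run plus the run after each closing bracket.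
import Mathlib
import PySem

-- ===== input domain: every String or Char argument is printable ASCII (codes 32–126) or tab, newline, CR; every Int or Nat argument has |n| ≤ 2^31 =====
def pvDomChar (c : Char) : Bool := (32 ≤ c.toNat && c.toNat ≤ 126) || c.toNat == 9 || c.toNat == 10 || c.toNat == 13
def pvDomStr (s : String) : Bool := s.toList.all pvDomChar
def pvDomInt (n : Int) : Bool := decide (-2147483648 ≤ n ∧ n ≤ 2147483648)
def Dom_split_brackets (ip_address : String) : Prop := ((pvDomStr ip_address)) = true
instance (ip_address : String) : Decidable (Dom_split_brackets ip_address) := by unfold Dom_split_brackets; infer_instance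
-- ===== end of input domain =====

-- B replaces A's single stateful scan with two independent run-slicing passes (avoiding per-char string concatenation); proved to return the same values.

-- ===== PORT A =====
-- helper for A's `xs[-1] = xs[-1] + char` (the list is provably nonempty whenever A reaches it)
def pvAppendLast (c : Char) : List String → List String
  | [] => []
  | [s] => [s.push c]
  | s :: rest => s :: pvAppendLast c rest

def pvStepA : (List String × List String × Bool) → Char → List String × List String × Bool
  | (outside, inside, in_brackets), c =>
    if c = '[' then (outside, inside ++ [""], true)
    else if c = ']' then (outside ++ [""], inside, false)
    else if in_brackets then (outside, pvAppendLast c inside, in_brackets)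
    else (pvAppendLast c outside, inside, in_brackets)

def split_brackets (ip_address : String) : List String × List String :=
  let st := ip_address.toList.foldl pvStepA ([""], [], false)
  (st.2.1, st.1)

-- ===== PORT B =====
def pvNB (c : Char) : Bool := c ≠ '[' && c ≠ ']'

-- the run of non-bracket chars following each occurrence of `b`
def pvRunsAfter (b : Char) : List Char → List String
  | [] => []
  | c :: cs =>
    if c = b then String.ofList (cs.takeWhile pvNB) :: pvRunsAfter b (cs.dropWhile pvNB)
    else pvRunsAfter b cs
termination_by l => l.length
decreasing_by
  · simpa using Nat.lt_succ_of_le (List.length_dropWhile_le ..)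
  · simp

def split_brackets_alt (ip_address : String) : List String × List String :=
  let l := ip_address.toList
  (pvRunsAfter '[' l, String.ofList (l.takeWhile pvNB) :: pvRunsAfter ']' l)

-- ===== PRECONDITION & SPEC =====
def Spec_split_brackets (ip_address : String) (out : List String × List String) : Prop := out = split_brackets_alt ip_address
instance (ip_address : String) (out : List String × List String) : Decidable (Spec_split_brackets ip_address out) := by unfold Spec_split_brackets; infer_instance

-- ===== CLAIM (what is proved, stated in full; the proofs are below) =====
def Claim_equal_split_brackets : Prop := ∀ (ip_address : String), Dom_split_brackets ip_address → Spec_split_brackets ip_address (split_brackets ip_address)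

-- ===== LEMMAS AND PROOFS =====

theorem pvAppendLast_append (c : Char) (xs : List String) (s : String) :
    pvAppendLast c (xs ++ [s]) = xs ++ [s.push c] := by
  induction xs with
  | nil => rfl
  | cons a t ih =>
    cases t with
    | nil => simp [pvAppendLast]
    | cons b u => simpa [pvAppendLast] using ih

theorem pv_append_ofList_nil (s : String) : s ++ String.ofList [] = s := by
  apply String.ext; simp

theorem pv_empty_append (s : String) : "" ++ s = s := by
  apply String.ext; simp

theorem pv_push_append_ofList (s : String) (c : Char) (r : List Char) :
    s.push c ++ String.ofList r = s ++ String.ofList (c :: r) := by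
  apply String.ext; simp

theorem pvRunsAfter_ne (b c : Char) (h : ¬ c = b) (cs : List Char) :
    pvRunsAfter b (c :: cs) = pvRunsAfter b cs := by
  simp [pvRunsAfter, h]

theorem pvRunsAfter_eq (b : Char) (cs : List Char) :
    pvRunsAfter b (b :: cs)
      = String.ofList (cs.takeWhile pvNB) :: pvRunsAfter b (cs.dropWhile pvNB) := by
  simp [pvRunsAfter]

theorem pvRunsAfter_dropWhile (b : Char) (hb : b = '[' ∨ b = ']') (l : List Char) :
    pvRunsAfter b (l.dropWhile pvNB) = pvRunsAfter b l := by
  induction l with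
  | nil => rfl
  | cons c cs ih =>
    by_cases h : pvNB c = true
    · have hcb : ¬ c = b := by
        simp [pvNB] at h; rcases hb with rfl | rfl <;> simp [h]
      rw [List.dropWhile_cons_of_pos h, ih, pvRunsAfter_ne b c hcb]
    · rw [List.dropWhile_cons_of_neg h]

-- main invariant for A's fold, both flag states at once
theorem pvFold_main (l : List Char) :
    (∀ (xs : List String) (s : String) (i : List String),
      ((l.foldl pvStepA (xs ++ [s], i, false)).1
          = (xs ++ [s ++ String.ofList (l.takeWhile pvNB)]) ++ pvRunsAfter ']' l)
      ∧ (l.foldl pvStepA (xs ++ [s], i, false)).2.1 = i ++ pvRunsAfter '[' l)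
    ∧ (∀ (o : List String) (ys : List String) (t : String),
      ((l.foldl pvStepA (o, ys ++ [t], true)).1 = o ++ pvRunsAfter ']' l)
      ∧ (l.foldl pvStepA (o, ys ++ [t], true)).2.1
          = (ys ++ [t ++ String.ofList (l.takeWhile pvNB)]) ++ pvRunsAfter '[' l) := by
  induction l with
  | nil => simp [pvRunsAfter]
  | cons c cs ih =>
    obtain ⟨ihF, ihT⟩ := ih
    constructor
    · intro xs s i
      by_cases hob : c = '['
      · subst hob
        have hstep : pvStepA (xs ++ [s], i, false) '[' = (xs ++ [s], i ++ [""], true) := by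
          simp [pvStepA]
        rw [List.foldl_cons, hstep]
        have h := ihT (xs ++ [s]) i ""
        have htw : List.takeWhile pvNB ('[' :: cs) = [] :=
          List.takeWhile_cons_of_neg (by decide)
        refine ⟨?_, ?_⟩
        · rw [htw, pv_append_ofList_nil, pvRunsAfter_ne ']' '[' (by decide)]
          exact h.1
        · rw [pvRunsAfter_eq '[' cs, pvRunsAfter_dropWhile '[' (Or.inl rfl)]
          have := h.2
          rw [pv_empty_append] at this
          simpa using this
      · by_cases hcb : c = ']'
        · subst hcb
          have hstep : pvStepA (xs ++ [s], i, false) ']'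
              = ((xs ++ [s]) ++ [""], i, false) := by simp [pvStepA]
          rw [List.foldl_cons, hstep]
          have h := ihF (xs ++ [s]) "" i
          have htw : List.takeWhile pvNB (']' :: cs) = [] :=
            List.takeWhile_cons_of_neg (by decide)
          refine ⟨?_, ?_⟩
          · rw [htw, pv_append_ofList_nil, pvRunsAfter_eq ']' cs,
              pvRunsAfter_dropWhile ']' (Or.inr rfl)]
            have := h.1
            rw [pv_empty_append] at this
            simpa using this
          · rw [pvRunsAfter_ne '[' ']' (by decide)]
            exact h.2
        · have hnb : pvNB c = true := by simp [pvNB, hob, hcb]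
          have hstep : pvStepA (xs ++ [s], i, false) c
              = (xs ++ [s.push c], i, false) := by
            simp [pvStepA, hob, hcb, pvAppendLast_append]
          rw [List.foldl_cons, hstep]
          have h := ihF xs (s.push c) i
          refine ⟨?_, ?_⟩
          · rw [List.takeWhile_cons_of_pos hnb, pvRunsAfter_ne ']' c hcb,
              ← pv_push_append_ofList]
            exact h.1
          · rw [pvRunsAfter_ne '[' c hob]
            exact h.2
    · intro o ys t
      by_cases hob : c = '['
      · subst hob
        have hstep : pvStepA (o, ys ++ [t], true) '['
            = (o, (ys ++ [t]) ++ [""], true) := by simp [pvStepA]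
        rw [List.foldl_cons, hstep]
        have h := ihT o (ys ++ [t]) ""
        have htw : List.takeWhile pvNB ('[' :: cs) = [] :=
          List.takeWhile_cons_of_neg (by decide)
        refine ⟨?_, ?_⟩
        · rw [pvRunsAfter_ne ']' '[' (by decide)]
          exact h.1
        · rw [htw, pv_append_ofList_nil, pvRunsAfter_eq '[' cs,
            pvRunsAfter_dropWhile '[' (Or.inl rfl)]
          have := h.2
          rw [pv_empty_append] at this
          simpa using this
      · by_cases hcb : c = ']'
        · subst hcb
          have hstep : pvStepA (o, ys ++ [t], true) ']'
              = (o ++ [""], ys ++ [t], false) := by simp [pvStepA]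
          rw [List.foldl_cons, hstep]
          have h := ihF o "" (ys ++ [t])
          have htw : List.takeWhile pvNB (']' :: cs) = [] :=
            List.takeWhile_cons_of_neg (by decide)
          refine ⟨?_, ?_⟩
          · rw [pvRunsAfter_eq ']' cs, pvRunsAfter_dropWhile ']' (Or.inr rfl)]
            have := h.1
            rw [pv_empty_append] at this
            simpa using this
          · rw [htw, pv_append_ofList_nil, pvRunsAfter_ne '[' ']' (by decide)]
            exact h.2
        · have hnb : pvNB c = true := by simp [pvNB, hob, hcb]
          have hstep : pvStepA (o, ys ++ [t], true) c
              = (o, ys ++ [t.push c], true) := by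
            simp [pvStepA, hob, hcb, pvAppendLast_append]
          rw [List.foldl_cons, hstep]
          have h := ihT o ys (t.push c)
          refine ⟨?_, ?_⟩
          · rw [pvRunsAfter_ne ']' c hcb]
            exact h.1
          · rw [List.takeWhile_cons_of_pos hnb, pvRunsAfter_ne '[' c hob,
              ← pv_push_append_ofList]
            exact h.2

-- ===== VERDICT (by name: the statement is the Claim_ definition above) =====
theorem split_brackets_spec : Claim_equal_split_brackets := by
  intro ip _
  unfold Spec_split_brackets split_brackets split_brackets_alt
  have h := (pvFold_main ip.toList).1 [] "" []
  have h1 := h.1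
  have h2 := h.2
  simp only [List.nil_append] at h1 h2
  refine Prod.ext ?_ ?_
  · show (List.foldl pvStepA ([""], [], false) ip.toList).2.1 = pvRunsAfter '[' ip.toList
    exact h2
  · show (List.foldl pvStepA ([""], [], false) ip.toList).1
        = String.ofList (List.takeWhile pvNB ip.toList) :: pvRunsAfter ']' ip.toList
    rw [h1, pv_empty_append]
    rfl
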